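-- pv_equiv track=rewrite | github.com/Sap-has/Assignments | Dataflow/df.py | reaching_defs_transfer
-- ===== SOURCE A (Python) =====
-- def reaching_defs_transfer(block_name, block, in_vals):
--     out_vals = set(in_vals)
--
--     for i, instr in enumerate(block):
--         if "dest" in instr:
--             var = instr["dest"]
--             out_vals = {defn for defn in out_vals if not defn.startswith(var + ".")}
--             out_vals.add(f"{var}.{block_name}.{i}")
--
--     return out_vals
-- ===== SOURCE B (Python) =====
-- def _killed(defn, kills):
--     # defn is killed iff some prefix of defn ending at a '.' is in the kill set
--     return any(defn[:p + 1] in kills for p in range(len(defn)) if defn[p] == ".")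
--
--
-- def reaching_defs_transfer(block_name, block, in_vals):
--     # One backward pass over the block: a definition generated at i survives iff no
--     # later instruction kills it; then the incoming definitions are filtered once
--     # against the full kill set via hashed dot-prefix lookups.
--     kills = set()       # prefixes "var." of all dest variables
--     gen_rev = []        # surviving generated definitions, in reverse order
--     for i, instr in reversed(list(enumerate(block))):
--         if "dest" in instr:
--             var = instr["dest"]
--             defn = f"{var}.{block_name}.{i}"
--             if not _killed(defn, kills):
--                 gen_rev.append(defn)
--             kills.add(var + ".")
--     out = [d for d in dict.fromkeys(in_vals) if not _killed(d, kills)]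
--     out.extend(reversed(gen_rev))
--     return set(out)
-- ===== Notes on version B (the rewrite author's own statement) =====
-- stated objective: alternative
-- what changed: Replaces A's forward pass that rebuilds the whole live set with a startswith rescan at every dest by a single backward pass collecting surviving generated definitions against an accumulated hash set of 'var.' kill prefixes, then one final filter of the incoming definitions by hashed dot-prefix lookups; it trades per-dest rescans for per-character dot-prefix lookups.
import Mathlib
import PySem

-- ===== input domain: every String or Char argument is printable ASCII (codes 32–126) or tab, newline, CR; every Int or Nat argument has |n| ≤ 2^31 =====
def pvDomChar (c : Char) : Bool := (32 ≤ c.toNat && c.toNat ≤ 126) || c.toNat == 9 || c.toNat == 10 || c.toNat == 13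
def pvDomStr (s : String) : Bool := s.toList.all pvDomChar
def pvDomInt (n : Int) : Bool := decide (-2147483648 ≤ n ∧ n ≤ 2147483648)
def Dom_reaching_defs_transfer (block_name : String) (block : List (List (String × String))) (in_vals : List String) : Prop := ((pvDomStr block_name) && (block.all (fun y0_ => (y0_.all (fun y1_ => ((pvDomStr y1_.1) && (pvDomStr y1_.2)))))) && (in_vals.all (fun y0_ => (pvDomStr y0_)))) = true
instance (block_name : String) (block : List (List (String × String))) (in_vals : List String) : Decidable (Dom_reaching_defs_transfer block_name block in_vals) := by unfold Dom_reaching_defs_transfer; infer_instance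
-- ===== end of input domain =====

-- B replaces A's per-dest rescan of the whole live set by one backward pass plus a hashed
-- kill-prefix set; equivalence of the two ports is proved for all inputs (both are total).

-- shared string builders: f"{var}.{block_name}.{i}" and var + "."
def pvDefn (var : String) (bn : String) (i : Int) : String :=
  String.ofList (var.toList ++ '.' :: bn.toList ++ '.' :: PySem.Int.toChars i)
def pvDot (var : String) : String := String.ofList (var.toList ++ ['.'])

-- ===== PORT A =====
-- 'if "dest" in instr: var = instr["dest"]' is ported as one match on the dict lookup
def pvAStep (bn : String) (out_vals : PySem.Set String) (x : Int × List (String × String)) : PySem.Set String :=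
  match PySem.Dict.get? ⟨x.2⟩ "dest" with
  | some var =>
      PySem.Set.add (out_vals.filter (fun defn => !(PySem.Str.startswith defn (pvDot var))))
        (pvDefn var bn x.1)
  | none => out_vals

def reaching_defs_transfer (block_name : String) (block : List (List (String × String))) (in_vals : List String) : List String :=
  (PySem.List.enumerate block).foldl (pvAStep block_name) (PySem.Set.ofList in_vals)

-- ===== PORT B =====
def pvKilled (defn : String) (kills : PySem.Set String) : Bool :=
  (PySem.List.pyRange 0 (PySem.Str.len defn)).any (fun p =>
    PySem.Str.pyGet? defn p == some '.' &&
      PySem.Set.contains kills (PySem.Str.slice defn none (some (p + 1))))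

def pvBStep (bn : String) (st : PySem.Set String × List String) (x : Int × List (String × String)) : PySem.Set String × List String :=
  match PySem.Dict.get? ⟨x.2⟩ "dest" with
  | some var =>
      let defn := pvDefn var bn x.1
      (PySem.Set.add st.1 (pvDot var),
       if pvKilled defn st.1 then st.2 else st.2 ++ [defn])
  | none => st

def reaching_defs_transfer_alt (block_name : String) (block : List (List (String × String))) (in_vals : List String) : List String :=
  let st := ((PySem.List.enumerate block).reverse).foldl (pvBStep block_name) (PySem.Set.empty, [])
  let out := (PySem.List.dedup in_vals).filter (fun d => !pvKilled d st.1) ++ st.2.reverse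
  PySem.Set.ofList out

-- ===== PRECONDITION & SPEC =====
def Spec_reaching_defs_transfer (block_name : String) (block : List (List (String × String))) (in_vals : List String) (out : List String) : Prop := out = reaching_defs_transfer_alt block_name block in_vals
instance (block_name : String) (block : List (List (String × String))) (in_vals : List String) (out : List String) : Decidable (Spec_reaching_defs_transfer block_name block in_vals out) := by unfold Spec_reaching_defs_transfer; infer_instance

-- ===== CLAIM (what is proved, stated in full; the proofs are below) =====
def Claim_equal_reaching_defs_transfer : Prop := ∀ (block_name : String) (block : List (List (String × String))) (in_vals : List String), Dom_reaching_defs_transfer block_name block in_vals → Spec_reaching_defs_transfer block_name block in_vals (reaching_defs_transfer block_name block in_vals)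

-- ===== LEMMAS AND PROOFS =====

-- the (index, dest-var) pairs of the instructions that have a dest
def pvDests (items : List (Int × List (String × String))) : List (Int × String) :=
  items.filterMap (fun x => (PySem.Dict.get? ⟨x.2⟩ "dest").map (fun v => (x.1, v)))

def pvKilledBy (ds : List (Int × String)) (d : String) : Bool :=
  ds.any (fun t => PySem.Str.startswith d (pvDot t.2))

-- the generated definitions that survive all later kills, in block order
def pvGens (bn : String) : List (Int × String) → List String
  | [] => []
  | t :: ds =>
      (if pvKilledBy ds (pvDefn t.2 bn t.1) then [] else [pvDefn t.2 bn t.1]) ++ pvGens bn ds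

theorem pvStartswith_defn_dot (v bn : String) (i : Int) :
    PySem.Str.startswith (pvDefn v bn i) (pvDot v) = true := by
  simp [PySem.Str.startswith_eq, PySem.Chars.startswith_iff, pvDefn, pvDot]

theorem pvKilled_eq (d : String) (kills : PySem.Set String)
    (h : ∀ k ∈ kills, ∃ v : String, k = pvDot v) :
    pvKilled d kills = kills.any (fun k => PySem.Str.startswith d k) := by
  rw [Bool.eq_iff_iff]
  constructor
  · intro hk
    rw [pvKilled, List.any_eq_true] at hk
    obtain ⟨p, hp, hcond⟩ := hk
    rw [PySem.List.mem_pyRange_one] at hp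
    rw [Bool.and_eq_true, beq_iff_eq] at hcond
    obtain ⟨hget, hcont⟩ := hcond
    rw [PySem.Set.contains_iff] at hcont
    rw [List.any_eq_true]
    refine ⟨_, hcont, ?_⟩
    -- the slice is a prefix of d
    have hle : (0:Int) ≤ p + 1 := by omega
    rw [PySem.Str.startswith_eq, PySem.Chars.startswith_iff, PySem.Str.toList_slice]
    simp only [PySem.Chars.slice]
    rw [PySem.List.slice_to _ hle]
    exact List.take_prefix _ _
  · intro hb
    rw [List.any_eq_true] at hb
    obtain ⟨k, hkmem, hsw⟩ := hb
    obtain ⟨v, rfl⟩ := h k hkmem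
    rw [PySem.Str.startswith_eq, PySem.Chars.startswith_iff] at hsw
    rw [pvKilled, List.any_eq_true]
    obtain ⟨rest, hrest⟩ := hsw
    have htl : (pvDot v).toList = v.toList ++ ['.'] := by simp [pvDot]
    rw [htl] at hrest
    set p : Nat := v.toList.length with hp
    have hlen : p + 1 ≤ d.toList.length := by
      rw [← hrest]; simp [hp]
    refine ⟨(p : Int), ?_, ?_⟩
    · rw [PySem.List.mem_pyRange_one]
      constructor
      · positivity
      · have : (PySem.Str.len d) = (d.toList.length : Int) := by
          simp [PySem.Str.len_eq]
        rw [this]; exact_mod_cast by omega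
    · rw [Bool.and_eq_true, beq_iff_eq]
      constructor
      · rw [PySem.Str.pyGet?_natCast]
        rw [← hrest]
        rw [List.getElem?_append_left (by simp [hp])]
        simp [hp]
      · rw [PySem.Set.contains_iff]
        have : PySem.Str.slice d none (some ((p : Int) + 1)) = pvDot v := by
          have h1 : (PySem.Str.slice d none (some ((p : Int) + 1))).toList = v.toList ++ ['.'] := by
            rw [PySem.Str.toList_slice]
            simp only [PySem.Chars.slice]
            rw [PySem.List.slice_to _ (by omega)]
            rw [← hrest]
            have : ((p : Int) + 1).toNat = p + 1 := by omega
            rw [this, List.take_append_of_le_length (by simp [hp])]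
            simp [hp]
          have := congrArg String.ofList h1
          simpa [pvDot] using this
        rw [this]; exact hkmem

theorem pvGens_mem (bn : String) (ds : List (Int × String)) (x : String)
    (hx : x ∈ pvGens bn ds) : ∃ t ∈ ds, x = pvDefn t.2 bn t.1 := by
  induction ds with
  | nil => simp [pvGens] at hx
  | cons t ds ih =>
    rw [pvGens, List.mem_append] at hx
    rcases hx with hx | hx
    · refine ⟨t, by simp, ?_⟩
      split at hx <;> simp_all
    · obtain ⟨u, hu, hux⟩ := ih hx
      exact ⟨u, by simp [hu], hux⟩

theorem pvKilledBy_append (ds : List (Int × String)) (t : Int × String) (d : String) :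
    pvKilledBy (ds ++ [t]) d = (pvKilledBy ds d || PySem.Str.startswith d (pvDot t.2)) := by
  simp [pvKilledBy]

theorem pvGens_append (bn : String) (ds : List (Int × String)) (t : Int × String) :
    pvGens bn (ds ++ [t]) =
      (pvGens bn ds).filter (fun d => !PySem.Str.startswith d (pvDot t.2)) ++ [pvDefn t.2 bn t.1] := by
  induction ds with
  | nil => simp [pvGens, pvKilledBy]
  | cons u ds ih =>
    rw [List.cons_append, pvGens, pvGens, ih, pvKilledBy_append]
    cases hk : pvKilledBy ds (pvDefn u.2 bn u.1) <;>
      cases hs : PySem.Str.startswith (pvDefn u.2 bn u.1) (pvDot t.2) <;>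
        (rw [PySem.Str.startswith_eq] at hs; simp [hs, PySem.Str.startswith_eq])

theorem pvGens_nodup (bn : String) (ds : List (Int × String)) : (pvGens bn ds).Nodup := by
  induction ds with
  | nil => simp [pvGens]
  | cons t ds ih =>
    rw [pvGens]
    split
    · simpa using ih
    · rename_i hk
      rw [List.singleton_append, List.nodup_cons]
      refine ⟨fun hmem => ?_, ih⟩
      obtain ⟨u, hu, hequ⟩ := pvGens_mem bn ds _ hmem
      apply hk
      rw [pvKilledBy, List.any_eq_true]
      exact ⟨u, hu, by rw [hequ]; exact pvStartswith_defn_dot _ _ _⟩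

-- A's loop characterised: survivors of the start set, then the surviving generated defs
theorem pvA_char (bn : String) (items : List (Int × List (String × String))) (S : List String) :
    items.foldl (pvAStep bn) S
    = S.filter (fun d => !pvKilledBy (pvDests items) d) ++ pvGens bn (pvDests items) := by
  induction items using List.reverseRecOn with
  | nil => simp [pvDests, pvGens, pvKilledBy]
  | append_singleton items x ih =>
    rw [List.foldl_append, List.foldl_cons, List.foldl_nil, ih]
    have hdests : pvDests (items ++ [x]) = pvDests items ++ pvDests [x] := by
      simp [pvDests]
    rw [pvAStep]
    cases hg : PySem.Dict.get? ⟨x.2⟩ "dest" with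
    | none =>
      have h0 : pvDests [x] = [] := by simp [pvDests, hg]
      simp only [hdests, h0, List.append_nil]
    | some var =>
      dsimp only
      have hx1 : pvDests [x] = [(x.1, var)] := by simp [pvDests, hg]
      rw [hdests, hx1]
      rw [List.filter_append, List.filter_filter]
      rw [pvGens_append]
      have hset : ∀ (l : List String),
          (∀ d ∈ l, PySem.Str.startswith d (pvDot var) = false) →
          PySem.Set.add l (pvDefn var bn x.1) = l ++ [pvDefn var bn x.1] := by
        intro l hl
        have hc : PySem.Set.contains l (pvDefn var bn x.1) = false := by
          rw [← Bool.not_eq_true]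
          rw [PySem.Set.contains_iff]
          intro hmem
          have := hl _ hmem
          rw [pvStartswith_defn_dot] at this
          exact Bool.true_eq_false.mp this
        rw [PySem.Set.add, hc]
        simp
      rw [hset]
      · rw [List.append_assoc]
        congr 1
        apply List.filter_congr
        intro d _
        rw [pvKilledBy_append]
        cases pvKilledBy (pvDests items) d <;> cases PySem.Str.startswith d (pvDot var) <;> rfl
      · intro d hd
        rw [List.mem_append] at hd
        rcases hd with hd | hd <;>
        · rw [List.mem_filter] at hd
          have hh := hd.2
          simp only [Bool.and_eq_true, Bool.not_eq_eq_eq_not, Bool.not_true] at hh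
          first
          | exact hh.1
          | exact hh

-- B's loop characterised: the kill set holds exactly the dot-prefixes of the dests,
-- and the gen accumulator is the surviving generated defs reversed
theorem pvB_char (bn : String) (items : List (Int × List (String × String))) :
    (items.reverse.foldl (pvBStep bn) (PySem.Set.empty, [])).2
      = (pvGens bn (pvDests items)).reverse ∧
    (∀ k, k ∈ (items.reverse.foldl (pvBStep bn) (PySem.Set.empty, [])).1
      ↔ ∃ t ∈ pvDests items, k = pvDot t.2) := by
  induction items with
  | nil => simp [pvDests, pvGens, PySem.Set.empty]
  | cons y rest ih =>
    rw [List.reverse_cons, List.foldl_append, List.foldl_cons, List.foldl_nil]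
    obtain ⟨ih2, ih1⟩ := ih
    rw [pvBStep]
    cases hg : PySem.Dict.get? ⟨y.2⟩ "dest" with
    | none =>
      have h0 : pvDests (y :: rest) = pvDests rest := by simp [pvDests, hg]
      rw [h0]
      exact ⟨ih2, ih1⟩
    | some var =>
      dsimp only
      have hdests : pvDests (y :: rest) = (y.1, var) :: pvDests rest := by
        simp [pvDests, hg]
      have hdotshape : ∀ k ∈ (rest.reverse.foldl (pvBStep bn) (PySem.Set.empty, [])).1,
          ∃ v : String, k = pvDot v := by
        intro k hk
        obtain ⟨t, _, hkt⟩ := (ih1 k).mp hk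
        exact ⟨t.2, hkt⟩
      have hkilled : ∀ d, pvKilled d (rest.reverse.foldl (pvBStep bn) (PySem.Set.empty, [])).1
          = pvKilledBy (pvDests rest) d := by
        intro d
        rw [pvKilled_eq d _ hdotshape]
        rw [Bool.eq_iff_iff, List.any_eq_true, pvKilledBy, List.any_eq_true]
        constructor
        · rintro ⟨k, hk, hsw⟩
          obtain ⟨t, ht, hkt⟩ := (ih1 k).mp hk
          exact ⟨t, ht, by rw [← hkt]; exact hsw⟩
        · rintro ⟨t, ht, hsw⟩
          exact ⟨pvDot t.2, (ih1 _).mpr ⟨t, ht, rfl⟩, hsw⟩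
      constructor
      · rw [hkilled, ih2, hdests, pvGens]
        split <;> simp
      · intro k
        rw [PySem.Set.mem_add, ih1, hdests]
        constructor
        · rintro (⟨t, ht, hkt⟩ | rfl)
          · exact ⟨t, by simp [ht], hkt⟩
          · exact ⟨(y.1, var), by simp, rfl⟩
        · rintro ⟨t, ht, hkt⟩
          rw [List.mem_cons] at ht
          rcases ht with rfl | ht
          · exact Or.inr hkt
          · exact Or.inl ⟨t, ht, hkt⟩

-- ===== VERDICT (by name: the statement is the Claim_ definition above) =====
theorem reaching_defs_transfer_spec : Claim_equal_reaching_defs_transfer := by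
  intro bn block in_vals _
  unfold Spec_reaching_defs_transfer reaching_defs_transfer reaching_defs_transfer_alt
  dsimp only
  rw [pvA_char]
  obtain ⟨h2, h1⟩ := pvB_char bn (PySem.List.enumerate block)
  rw [h2]
  have hdotshape : ∀ k ∈ ((PySem.List.enumerate block).reverse.foldl (pvBStep bn)
      (PySem.Set.empty, [])).1, ∃ v : String, k = pvDot v := by
    intro k hk
    obtain ⟨t, _, hkt⟩ := (h1 k).mp hk
    exact ⟨t.2, hkt⟩
  have hkilled : ∀ d, pvKilled d ((PySem.List.enumerate block).reverse.foldl (pvBStep bn)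
      (PySem.Set.empty, [])).1 = pvKilledBy (pvDests (PySem.List.enumerate block)) d := by
    intro d
    rw [pvKilled_eq d _ hdotshape]
    rw [Bool.eq_iff_iff, List.any_eq_true, pvKilledBy, List.any_eq_true]
    constructor
    · rintro ⟨k, hk, hsw⟩
      obtain ⟨t, ht, hkt⟩ := (h1 k).mp hk
      exact ⟨t, ht, by rw [← hkt]; exact hsw⟩
    · rintro ⟨t, ht, hsw⟩
      exact ⟨pvDot t.2, (h1 _).mpr ⟨t, ht, rfl⟩, hsw⟩
  have hfilter : (PySem.List.dedup in_vals).filter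
        (fun d => !pvKilled d ((PySem.List.enumerate block).reverse.foldl (pvBStep bn)
          (PySem.Set.empty, [])).1)
      = (PySem.Set.ofList in_vals).filter
        (fun d => !pvKilledBy (pvDests (PySem.List.enumerate block)) d) := by
    rw [PySem.List.dedup_eq_ofList]
    apply List.filter_congr
    intro d _
    rw [hkilled]
  rw [hfilter, List.reverse_reverse]
  have hnodup : (List.filter (fun d => !pvKilledBy (pvDests (PySem.List.enumerate block)) d)
      (PySem.Set.ofList in_vals) ++ pvGens bn (pvDests (PySem.List.enumerate block))).Nodup := by
    apply List.Nodup.append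
    · exact (PySem.Set.nodup_ofList in_vals).filter _
    · exact pvGens_nodup bn _
    · intro d hd1 hd2
      obtain ⟨t, ht, rfl⟩ := pvGens_mem bn _ _ hd2
      rw [List.mem_filter] at hd1
      have hh := hd1.2
      rw [Bool.not_eq_eq_eq_not, Bool.not_true] at hh
      rw [pvKilledBy] at hh
      have hany : (pvDests (PySem.List.enumerate block)).any
          (fun u => PySem.Str.startswith (pvDefn t.2 bn t.1) (pvDot u.2)) = true := by
        rw [List.any_eq_true]
        exact ⟨t, ht, pvStartswith_defn_dot _ _ _⟩
      rw [hany] at hh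
      exact Bool.true_eq_false.mp hh
  rw [PySem.Set.ofList_eq_self_of_nodup _ hnodup]
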